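-- pv_equiv track=rewrite | github.com/AnkiHubSoftware/ankihub_addon | ankihub/main/utils.py | lowest_level_common_ancestor_deck_name
-- ===== SOURCE A (Python) =====
-- from typing import Any, Collection, Dict, Iterable, List, Optional, Sequence, Set, Tuple
--
-- def lowest_level_common_ancestor_deck_name(deck_names: Iterable[str]) -> Optional[str]:
--     lowest_level_deck_name = max(deck_names, key=lambda name: name.count("::"))
--     parts = lowest_level_deck_name.split("::")
--     result = lowest_level_deck_name
--     for i in range(1, len(parts) + 1):
--         cur_deck_name = "::".join(parts[:i])
--         if any(not name.startswith(cur_deck_name) for name in deck_names):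
--             result = "::".join(parts[: i - 1])
--             break
--
--     if result == "":
--         return None
--     else:
--         return result
-- ===== SOURCE B (Python) =====
-- def lowest_level_common_ancestor_deck_name(deck_names):
--     deck_names = list(deck_names)
--     lowest_level_deck_name = max(deck_names, key=lambda name: name.count("::"))
--     parts = lowest_level_deck_name.split("::")
--
--     def ok(k):
--         prefix = "::".join(parts[:k])
--         return all(name.startswith(prefix) for name in deck_names)
--
--     # all-names-startswith is monotone in the prefix depth: binary search for
--     # the deepest depth k such that every name starts with "::".join(parts[:k])
--     lo, hi = 0, len(parts)
--     while lo < hi: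
--         mid = (lo + hi + 1) // 2
--         if ok(mid):
--             lo = mid
--         else:
--             hi = mid - 1
--     return "::".join(parts[:lo]) or None
-- ===== Notes on version B (the rewrite author's own statement) =====
-- stated objective: alternative
-- what changed: A scans prefix depths 1,2,3,... linearly, testing every name at each depth until one fails; B instead binary-searches the largest depth k such that every name starts with the depth-k prefix, exploiting that the all-names-startswith predicate is antitone in the depth.
import Mathlib
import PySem

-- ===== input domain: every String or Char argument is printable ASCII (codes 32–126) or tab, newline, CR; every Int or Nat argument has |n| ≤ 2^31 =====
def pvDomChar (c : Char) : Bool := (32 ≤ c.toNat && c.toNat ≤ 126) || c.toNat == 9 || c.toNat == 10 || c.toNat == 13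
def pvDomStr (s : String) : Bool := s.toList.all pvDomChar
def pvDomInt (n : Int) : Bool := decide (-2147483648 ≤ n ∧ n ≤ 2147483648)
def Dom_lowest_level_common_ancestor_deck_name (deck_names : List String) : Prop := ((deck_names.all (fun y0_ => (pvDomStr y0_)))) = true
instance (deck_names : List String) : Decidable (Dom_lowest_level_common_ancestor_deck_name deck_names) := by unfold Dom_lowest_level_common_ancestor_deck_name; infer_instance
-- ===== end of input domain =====

-- B replaces A's linear scan over prefix depths by a binary search over the depth
-- (the all-names-startswith predicate is antitone in the depth); equivalence of the
-- RETURN value is proved on all non-empty inputs.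

def pvSep : List Char := [':', ':']

-- ===== PORT A =====
-- the for-loop of A: i runs over range(1, len(parts)+1); 'result' is the loop variable
def pvAGo (deck_names : List String) (parts : List (List Char)) (result : List Char) : Nat → Nat → List Char
  | 0, _ => result                 -- the range 1..len(parts) is exhausted: no break, result unchanged
  | fuel + 1, i =>                 -- fuel = number of remaining loop iterations
    let cur := PySem.Chars.join pvSep (parts.take i)
    if deck_names.any (fun name => !(PySem.Chars.startswith name.toList cur)) then
      PySem.Chars.join pvSep (parts.take (i - 1))
    else pvAGo deck_names parts result fuel (i + 1)

def lowest_level_common_ancestor_deck_name (deck_names : List String) : Option String :=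
  match PySem.List.max? deck_names (fun name => PySem.Str.count name "::") with
  | none => none   -- Python raises ValueError here (empty input); excluded by Pre_
  | some lowest =>
    let parts := PySem.Chars.splitOn lowest.toList pvSep
    let result := pvAGo deck_names parts lowest.toList parts.length 1
    if result = [] then none else some (String.ofList result)

-- ===== PORT B =====
def pvOk (deck_names : List String) (parts : List (List Char)) (k : Nat) : Bool :=
  deck_names.all (fun name => PySem.Chars.startswith name.toList (PySem.Chars.join pvSep (parts.take k)))

def pvBsearch (deck_names : List String) (parts : List (List Char)) : Nat → Nat → Nat → Nat
  | 0, lo, _ => lo                 -- fuel exhausted (hi - lo shrinks each turn, so fuel = initial hi - lo suffices)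
  | fuel + 1, lo, hi =>
    if lo < hi then
      let mid := (lo + hi + 1) / 2
      if pvOk deck_names parts mid then pvBsearch deck_names parts fuel mid hi
      else pvBsearch deck_names parts fuel lo (mid - 1)
    else lo

def lowest_level_common_ancestor_deck_name_alt (deck_names : List String) : Option String :=
  match PySem.List.max? deck_names (fun name => PySem.Str.count name "::") with
  | none => none   -- Python raises ValueError here (empty input); excluded by Pre_
  | some lowest =>
    let parts := PySem.Chars.splitOn lowest.toList pvSep
    let k := pvBsearch deck_names parts parts.length 0 parts.length
    let result := PySem.Chars.join pvSep (parts.take k)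
    if result = [] then none else some (String.ofList result)

-- ===== PRECONDITION & SPEC =====
-- Pre_ excludes only the empty list, on which Python's max (and hence A) raises ValueError.
def Pre_lowest_level_common_ancestor_deck_name (deck_names : List String) : Prop := deck_names ≠ []
instance (deck_names : List String) : Decidable (Pre_lowest_level_common_ancestor_deck_name deck_names) := by unfold Pre_lowest_level_common_ancestor_deck_name; infer_instance

def pvWitness_lowest_level_common_ancestor_deck_name : List String := ["Deck::A::B", "Deck::A", "Deck::A::C"]

def Spec_lowest_level_common_ancestor_deck_name (deck_names : List String) (out : Option String) : Prop := out = lowest_level_common_ancestor_deck_name_alt deck_names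
instance (deck_names : List String) (out : Option String) : Decidable (Spec_lowest_level_common_ancestor_deck_name deck_names out) := by unfold Spec_lowest_level_common_ancestor_deck_name; infer_instance

-- ===== CLAIM (what is proved, stated in full; the proofs are below) =====
def Claim_equal_lowest_level_common_ancestor_deck_name : Prop := ∀ (deck_names : List String), Dom_lowest_level_common_ancestor_deck_name deck_names → Pre_lowest_level_common_ancestor_deck_name deck_names → Spec_lowest_level_common_ancestor_deck_name deck_names (lowest_level_common_ancestor_deck_name deck_names)

-- ===== LEMMAS AND PROOFS =====

-- equation lemmas for PySem.Chars.splitOn.go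
theorem pvGoEq0 (sep l cur : List Char) (acc : List (List Char)) :
    PySem.Chars.splitOn.go sep 0 l cur acc = ((cur.reverse ++ l) :: acc).reverse := by
  rw [PySem.Chars.splitOn.go]

theorem pvGoEqNil (sep cur : List Char) (f : Nat) (acc : List (List Char)) :
    PySem.Chars.splitOn.go sep (f + 1) [] cur acc = (cur.reverse :: acc).reverse := by
  simp [PySem.Chars.splitOn.go]

theorem pvGoEqCons (sep cur : List Char) (c : Char) (rest : List Char) (f : Nat) (acc : List (List Char)) :
    PySem.Chars.splitOn.go sep (f + 1) (c :: rest) cur acc =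
      if sep.isPrefixOf (c :: rest) then
        PySem.Chars.splitOn.go sep f ((c :: rest).drop sep.length) [] (cur.reverse :: acc)
      else PySem.Chars.splitOn.go sep f rest (c :: cur) acc := by
  rw [PySem.Chars.splitOn.go]

-- splitOn.go ignores its accumulator up to prepending its reverse
theorem pvGo_acc (sep : List Char) (fuel : Nat) (l cur : List Char) (acc : List (List Char)) :
    PySem.Chars.splitOn.go sep fuel l cur acc = acc.reverse ++ PySem.Chars.splitOn.go sep fuel l cur [] := by
  induction fuel generalizing l cur acc with
  | zero => rw [pvGoEq0, pvGoEq0]; simp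
  | succ f ih =>
    cases l with
    | nil => rw [pvGoEqNil, pvGoEqNil]; simp
    | cons c rest =>
      rw [pvGoEqCons, pvGoEqCons]
      split_ifs with h
      · rw [ih ((c :: rest).drop sep.length) [] (cur.reverse :: acc),
            ih ((c :: rest).drop sep.length) [] [cur.reverse]]
        simp
      · exact ih rest (c :: cur) acc

theorem pvGo_ne_nil (sep : List Char) (fuel : Nat) (l cur : List Char) (acc : List (List Char)) :
    PySem.Chars.splitOn.go sep fuel l cur acc ≠ [] := by
  induction fuel generalizing l cur acc with
  | zero => rw [pvGoEq0]; simp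
  | succ f ih =>
    cases l with
    | nil => rw [pvGoEqNil]; simp
    | cons c rest =>
      rw [pvGoEqCons]
      split_ifs with h
      · exact ih _ _ _
      · exact ih _ _ _

theorem pvJoin_go (sep : List Char) (hsep : sep ≠ []) (fuel : Nat) (l cur : List Char) (hl : l.length < fuel) :
    PySem.Chars.join sep (PySem.Chars.splitOn.go sep fuel l cur []) = cur.reverse ++ l := by
  induction fuel generalizing l cur with
  | zero => omega
  | succ f ih =>
    cases l with
    | nil =>
      rw [pvGoEqNil]
      simp [PySem.Chars.join_singleton]
    | cons c rest =>
      rw [pvGoEqCons]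
      split_ifs with hpre
      · rw [pvGo_acc]
        have hne := pvGo_ne_nil sep f ((c :: rest).drop sep.length) [] []
        rcases hg : PySem.Chars.splitOn.go sep f ((c :: rest).drop sep.length) [] [] with _ | ⟨q, qs⟩
        · exact absurd hg hne
        · have hsl : 1 ≤ sep.length := by
            cases sep with
            | nil => exact absurd rfl hsep
            | cons a b => simp
          have hlen : ((c :: rest).drop sep.length).length < f := by
            rw [List.length_drop]
            simp only [List.length_cons] at hl ⊢
            omega
          have hIH := ih ((c :: rest).drop sep.length) [] hlen
          rw [hg] at hIH
          simp only [List.reverse_nil, List.nil_append] at hIH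
          simp only [List.reverse_cons, List.reverse_nil, List.nil_append, List.singleton_append]
          rw [PySem.Chars.join_cons_cons, hIH]
          have hsp : sep <+: (c :: rest) := List.isPrefixOf_iff_prefix.mp hpre
          obtain ⟨t, ht⟩ := hsp
          rw [← ht, List.drop_left]
          simp
      · have hIH := ih rest (c :: cur) (by simp at hl ⊢; omega)
        rw [hIH]
        simp

-- "::".join(s.split("::")) == s
theorem pvJoin_splitOn (s : List Char) :
    PySem.Chars.join pvSep (PySem.Chars.splitOn s pvSep) = s := by
  unfold PySem.Chars.splitOn
  simpa using pvJoin_go pvSep (by simp [pvSep]) (s.length + 1) s [] (by omega)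

theorem pvJoin_prefix_mono (sep : List Char) (a b : List (List Char)) (h : a <+: b) :
    PySem.Chars.join sep a <+: PySem.Chars.join sep b := by
  induction a generalizing b with
  | nil => rw [PySem.Chars.join_nil]; exact List.nil_prefix
  | cons x a' ih =>
    rw [List.cons_prefix_iff] at h
    obtain ⟨b', rfl, hab⟩ := h
    cases a' with
    | nil =>
      rw [PySem.Chars.join_singleton]
      cases b' with
      | nil => rw [PySem.Chars.join_singleton]
      | cons y bs =>
        rw [PySem.Chars.join_cons_cons, List.append_assoc]
        exact List.prefix_append x _
    | cons z a'' =>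
      cases b' with
      | nil => simp at hab
      | cons y bs =>
        rw [PySem.Chars.join_cons_cons, PySem.Chars.join_cons_cons,
            List.append_assoc, List.append_assoc]
        exact (List.prefix_append_right_inj x).mpr ((List.prefix_append_right_inj sep).mpr (ih _ hab))

theorem pvOk_mono (d : List String) (p : List (List Char)) (i j : Nat) (hij : i ≤ j)
    (hj : pvOk d p j = true) : pvOk d p i = true := by
  unfold pvOk at hj ⊢
  rw [List.all_eq_true] at hj ⊢
  intro name hmem
  have h1 := hj name hmem
  simp only [PySem.Chars.startswith_iff] at h1 ⊢
  exact (pvJoin_prefix_mono pvSep _ _ (List.take_isPrefix_take.mpr (Or.inl hij))).trans h1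

theorem pvOk_zero (d : List String) (p : List (List Char)) : pvOk d p 0 = true := by
  simp [pvOk, List.all_eq_true, PySem.Chars.startswith_iff, PySem.Chars.join_nil]

theorem pvAGo_eq_aux (d : List String) (p : List (List Char)) (res : List Char) (m : Nat) :
    ∀ i, i + m = p.length + 1 → 1 ≤ i → i ≤ Nat.findGreatest (fun k => pvOk d p k = true) p.length + 1 →
    pvAGo d p res m i =
      if Nat.findGreatest (fun k => pvOk d p k = true) p.length = p.length then res
      else PySem.Chars.join pvSep (p.take (Nat.findGreatest (fun k => pvOk d p k = true) p.length)) := by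
  induction m with
  | zero =>
    intro i hm h1 h2
    have hKle : Nat.findGreatest (fun k => pvOk d p k = true) p.length ≤ p.length := Nat.findGreatest_le _
    rw [pvAGo]
    rw [if_pos (by omega)]
  | succ m ih =>
    intro i hm h1 h2
    have hKle : Nat.findGreatest (fun k => pvOk d p k = true) p.length ≤ p.length := Nat.findGreatest_le _
    have hKok : pvOk d p (Nat.findGreatest (fun k => pvOk d p k = true) p.length) = true :=
      by simpa using Nat.findGreatest_spec (P := fun k => pvOk d p k = true) (n := p.length) (Nat.zero_le _) (pvOk_zero d p)
    have hi : i ≤ p.length := by omega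
    rw [pvAGo]
    have hcond : (d.any fun name => !PySem.Chars.startswith name.toList (PySem.Chars.join pvSep (p.take i))) = !pvOk d p i := by
      simp [pvOk, List.all_eq_not_any_not]
    simp only [hcond]
    by_cases hok : pvOk d p i = true
    · rw [hok]
      simp only [Bool.not_true, Bool.false_eq_true, if_false]
      have hiK : i ≤ Nat.findGreatest (fun k => pvOk d p k = true) p.length := by
        by_contra hc
        exact (Nat.findGreatest_is_greatest (P := fun k => pvOk d p k = true) (n := p.length) (by omega) hi) hok
      refine ih (i + 1) (by omega) (by omega) ?_
      omega
    · rw [Bool.not_eq_true] at hok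
      rw [hok]
      simp only [Bool.not_false, if_true]
      have hiK : ¬ (i ≤ Nat.findGreatest (fun k => pvOk d p k = true) p.length) := by
        intro hc
        have h3 := pvOk_mono d p i _ hc hKok
        rw [h3] at hok
        exact absurd hok (by decide)
      have hKi : Nat.findGreatest (fun k => pvOk d p k = true) p.length = i - 1 := by omega
      rw [if_neg (by omega), hKi]

theorem pvAGo_eq (d : List String) (p : List (List Char)) (res : List Char) :
    pvAGo d p res p.length 1 =
      if Nat.findGreatest (fun k => pvOk d p k = true) p.length = p.length then res
      else PySem.Chars.join pvSep (p.take (Nat.findGreatest (fun k => pvOk d p k = true) p.length)) :=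
  pvAGo_eq_aux d p res p.length 1 (by omega) le_rfl (by omega)

theorem pvBsearch_eq_aux (d : List String) (p : List (List Char)) (m : Nat) :
    ∀ lo hi, hi - lo ≤ m →
    lo ≤ Nat.findGreatest (fun k => pvOk d p k = true) p.length →
    Nat.findGreatest (fun k => pvOk d p k = true) p.length ≤ hi →
    hi ≤ p.length →
    pvBsearch d p m lo hi = Nat.findGreatest (fun k => pvOk d p k = true) p.length := by
  induction m with
  | zero =>
    intro lo hi hm hlo hhi hn
    rw [pvBsearch]
    omega
  | succ m ih =>
    intro lo hi hm hlo hhi hn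
    by_cases hlt : lo < hi
    · rw [pvBsearch, if_pos hlt]
      have hKok : pvOk d p (Nat.findGreatest (fun k => pvOk d p k = true) p.length) = true :=
        by simpa using Nat.findGreatest_spec (P := fun k => pvOk d p k = true) (n := p.length) (Nat.zero_le _) (pvOk_zero d p)
      by_cases hok : pvOk d p ((lo + hi + 1) / 2) = true
      · simp only [hok, if_true]
        have hmidK : (lo + hi + 1) / 2 ≤ Nat.findGreatest (fun k => pvOk d p k = true) p.length := by
          by_contra hc
          exact (Nat.findGreatest_is_greatest (P := fun k => pvOk d p k = true) (n := p.length) (by omega) (by omega)) hok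
        refine ih _ hi ?_ hmidK hhi hn
        omega
      · rw [Bool.not_eq_true] at hok
        simp only [hok, Bool.false_eq_true, if_false]
        have hKmid : Nat.findGreatest (fun k => pvOk d p k = true) p.length < (lo + hi + 1) / 2 := by
          by_contra hc
          have h3 := pvOk_mono d p ((lo + hi + 1) / 2) _ (by omega) hKok
          rw [h3] at hok
          exact absurd hok (by decide)
        refine ih lo _ ?_ hlo ?_ ?_ <;> omega
    · rw [pvBsearch, if_neg hlt]
      omega

theorem pvBsearch_eq (d : List String) (p : List (List Char))
    (hhi : Nat.findGreatest (fun k => pvOk d p k = true) p.length ≤ p.length) :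
    pvBsearch d p p.length 0 p.length = Nat.findGreatest (fun k => pvOk d p k = true) p.length :=
  pvBsearch_eq_aux d p p.length 0 p.length (by omega) (by omega) hhi le_rfl

-- ===== VERDICT (by name: the statement is the Claim_ definition above) =====
theorem lowest_level_common_ancestor_deck_name_spec : Claim_equal_lowest_level_common_ancestor_deck_name := by
  intro deck_names _ _
  unfold Spec_lowest_level_common_ancestor_deck_name
  unfold lowest_level_common_ancestor_deck_name lowest_level_common_ancestor_deck_name_alt
  cases hmax : PySem.List.max? deck_names (fun name => PySem.Str.count name "::") with
  | none => rfl
  | some lowest =>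
    simp only
    set p := PySem.Chars.splitOn lowest.toList pvSep with hp
    set K := Nat.findGreatest (fun k => pvOk deck_names p k = true) p.length with hK
    have hKle : K ≤ p.length := Nat.findGreatest_le _
    have hA := pvAGo_eq deck_names p lowest.toList
    have hB := pvBsearch_eq deck_names p hKle
    rw [hA, hB]
    by_cases hKn : K = p.length
    · rw [if_pos hKn]
      have : PySem.Chars.join pvSep (p.take K) = lowest.toList := by
        rw [hKn, List.take_length, hp, pvJoin_splitOn]
      rw [this]
    · rw [if_neg hKn]
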